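-- pv_equiv track=rewrite | github.com/Matoah/document-extraction | backend/graph/document/index.py | get_text_level
-- ===== SOURCE A (Python) =====
-- def get_text_level(key: str, toc_level_map: dict) -> tuple[int, str|None]:
--     if key in toc_level_map:
--         return toc_level_map[key], key
--     elif "_^_" in key:
--         pairs = key.split("_^_")
--         if len(pairs) == 2:
--             return get_text_level(pairs[1], toc_level_map)
--         else:
--             new_key = "_^_".join([*pairs[:-2], pairs[-1]])
--             return get_text_level(new_key, toc_level_map)
--     else:
--         return 0, None
-- ===== SOURCE B (Python) =====
-- def get_text_level(key: str, toc_level_map: dict) -> tuple[int, str | None]: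
--     # Split once; generate the candidate keys A would visit (prefix of segments
--     # shrinking from the right, always keeping the last segment) and return the
--     # first one present in the map.
--     segs = key.split("_^_")
--     last = segs[-1]
--     for k in range(len(segs) - 1, -1, -1):
--         cand = "_^_".join(segs[:k] + [last])
--         if cand in toc_level_map:
--             return toc_level_map[cand], cand
--     return 0, None
-- ===== Notes on version B (the rewrite author's own statement) =====
-- stated objective: alternative
-- what changed: Replaces the recursive strip-and-resplit (each call re-splits the rebuilt key) by a single split followed by one loop over the explicit candidate keys (prefix of segments plus last segment), doing one membership test per candidate.
import Mathlib
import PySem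

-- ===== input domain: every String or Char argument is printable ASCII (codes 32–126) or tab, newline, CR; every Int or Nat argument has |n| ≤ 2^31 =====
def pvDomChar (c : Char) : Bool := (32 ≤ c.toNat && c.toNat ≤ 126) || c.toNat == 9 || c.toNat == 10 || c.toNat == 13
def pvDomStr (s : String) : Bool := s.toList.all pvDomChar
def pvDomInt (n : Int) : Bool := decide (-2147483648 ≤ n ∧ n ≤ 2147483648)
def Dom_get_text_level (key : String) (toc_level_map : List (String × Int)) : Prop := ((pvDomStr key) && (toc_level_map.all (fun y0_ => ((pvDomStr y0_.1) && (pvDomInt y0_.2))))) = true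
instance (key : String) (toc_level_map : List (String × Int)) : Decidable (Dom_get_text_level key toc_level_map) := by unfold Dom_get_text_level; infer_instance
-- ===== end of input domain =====

-- B replaces A's recursive strip-and-resplit by one split plus a single loop over
-- the explicit candidate keys (same values everywhere; objective: alternative).


-- ===== PORT A =====
-- fuel is only a totality guard: key.toList.length + 1 is proved sufficient below.
def getTextLevelGo : Nat → String → List (String × Int) → Int × Option String
  | 0, _, _ => (0, none)
  | fuel + 1, key, toc_level_map =>
    match (PySem.Dict.mk toc_level_map).get? key with
    | some v => (v, some key)                                        -- if key in toc_level_map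
    | none =>
      if PySem.Str.isIn "_^_" key then                               -- elif "_^_" in key
        let pairs := (PySem.Str.split? key "_^_").getD []            -- key.split("_^_") (sep ≠ "", never none)
        if pairs.length == 2 then
          getTextLevelGo fuel ((PySem.List.pyGet? pairs 1).getD "") toc_level_map
        else
          let new_key := PySem.Str.join "_^_"
            (PySem.List.slice pairs none (some (-2)) ++ [(PySem.List.pyGet? pairs (-1)).getD ""])
          getTextLevelGo fuel new_key toc_level_map
      else (0, none)

def get_text_level (key : String) (toc_level_map : List (String × Int)) : Int × Option String :=
  getTextLevelGo (key.toList.length + 1) key toc_level_map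

-- ===== PORT B =====
def getTextLevelAltLoop : List Int → List String → String → List (String × Int) → Int × Option String
  | [], _, _, _ => (0, none)
  | k :: ks, segs, last, toc_level_map =>
    let cand := PySem.Str.join "_^_" (PySem.List.slice segs none (some k) ++ [last])
    match (PySem.Dict.mk toc_level_map).get? cand with
    | some v => (v, some cand)
    | none => getTextLevelAltLoop ks segs last toc_level_map

def get_text_level_alt (key : String) (toc_level_map : List (String × Int)) : Int × Option String :=
  let segs := (PySem.Str.split? key "_^_").getD []
  let last := (PySem.List.pyGet? segs (-1)).getD ""
  getTextLevelAltLoop (PySem.List.pyRange ((segs.length : Int) - 1) (-1) (-1)) segs last toc_level_map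

-- ===== PRECONDITION & SPEC =====
def Spec_get_text_level (key : String) (toc_level_map : List (String × Int)) (out : Int × Option String) : Prop := out = get_text_level_alt key toc_level_map
instance (key : String) (toc_level_map : List (String × Int)) (out : Int × Option String) : Decidable (Spec_get_text_level key toc_level_map out) := by unfold Spec_get_text_level; infer_instance

-- ===== CLAIM (what is proved, stated in full; the proofs are below) =====
def Claim_equal_get_text_level : Prop := ∀ (key : String) (toc_level_map : List (String × Int)), Dom_get_text_level key toc_level_map → Spec_get_text_level key toc_level_map (get_text_level key toc_level_map)

-- ===== LEMMAS AND PROOFS =====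

-- The separator, on the character-list side.
def sepC : List Char := ['_', '^', '_']

-- Clean model of PySem.Chars.splitOn · sepC.
def sp : List Char → List (List Char)
  | [] => [[]]
  | c :: rest =>
    if sepC.isPrefixOf (c :: rest) then [] :: sp (rest.drop 2)
    else (sp rest).modifyHead (c :: ·)
termination_by s => s.length
decreasing_by
  · simpa using Nat.lt_succ_of_le (Nat.sub_le _ _)
  · simp

-- p is "good": no occurrence of sepC in p ++ sepC before position p.length
-- (this is what leftmost-greedy splitting guarantees for every non-last part).
def good (p : List Char) : Prop := ∀ j < p.length, ¬ sepC <+: (p ++ sepC).drop j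

theorem sp_ne_nil (s : List Char) : sp s ≠ [] := by
  fun_induction sp s with
  | case1 => simp
  | case2 => simp
  | case3 c rest h ih => cases hsp : sp rest with
    | nil => exact absurd hsp ih
    | cons h t => simp

theorem go_spec (fuel : Nat) (l cur : List Char) (acc : List (List Char))
    (hf : l.length < fuel) :
    PySem.Chars.splitOn.go sepC fuel l cur acc
      = acc.reverse ++ (sp l).modifyHead (cur.reverse ++ ·) := by
  induction fuel generalizing l cur acc with
  | zero => omega
  | succ fuel ih =>
    cases l with
    | nil =>
      rw [PySem.Chars.splitOn.go]
      · simp [sp]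
      · omega
    | cons c rest =>
      rw [PySem.Chars.splitOn.go]
      by_cases hp : sepC.isPrefixOf (c :: rest)
      · have hlen : 2 ≤ rest.length := by
          have := (List.isPrefixOf_iff_prefix.mp hp).length_le
          simp [sepC] at this; omega
        have hdrop : ((c :: rest).drop sepC.length) = rest.drop 2 := by simp [sepC]
        simp only [hp, if_true, hdrop]
        rw [ih _ _ _ (by simp at hf ⊢; omega)]
        rw [show sp (c :: rest) = [] :: sp (rest.drop 2) from by rw [sp]; simp [hp]]
        cases hsp : sp (rest.drop 2) with
        | nil => exact absurd hsp (sp_ne_nil _)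
        | cons h t => simp
      · rw [if_neg hp]
        rw [ih _ _ _ (by simp at hf ⊢; omega)]
        rw [show sp (c :: rest) = (sp rest).modifyHead (c :: ·) from by rw [sp]; simp [hp]]
        cases hsp : sp rest with
        | nil => exact absurd hsp (sp_ne_nil _)
        | cons h t => simp

theorem splitOn_eq_sp (s : List Char) : PySem.Chars.splitOn s sepC = sp s := by
  have h := go_spec (s.length + 1) s [] [] (by omega)
  rw [PySem.Chars.splitOn, h]
  cases hsp : sp s <;> simp

theorem sp_head_prefix (s : List Char) : ∀ (h : List Char) (t : List (List Char)),
    sp s = h :: t → h <+: s := by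
  fun_induction sp s with
  | case1 => intro h t hsp; simp at hsp; simp [hsp.1]
  | case2 c rest hp ih => intro h t hsp; simp at hsp; simp [hsp.1]
  | case3 c rest hp ih =>
    intro h t hsp
    cases hsp' : sp rest with
    | nil => exact absurd hsp' (sp_ne_nil _)
    | cons h' t' =>
      rw [hsp'] at hsp
      simp at hsp
      obtain ⟨rfl, rfl⟩ := hsp
      exact List.cons_prefix_cons.mpr ⟨rfl, ih h' t' hsp'⟩

theorem sp_sepFree (s : List Char) : ∀ p ∈ sp s, ¬ sepC <:+: p := by
  fun_induction sp s with
  | case1 =>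
    intro p hp hinf
    simp at hp
    subst hp
    have := hinf.length_le
    simp [sepC] at this
  | case2 c rest hp ih =>
    intro p hmem hinf
    rcases List.mem_cons.mp hmem with rfl | hmem
    · have := hinf.length_le; simp [sepC] at this
    · exact ih p hmem hinf
  | case3 c rest hp ih =>
    intro p hmem hinf
    cases hsp' : sp rest with
    | nil => exact absurd hsp' (sp_ne_nil _)
    | cons h' t' =>
      rw [hsp'] at hmem
      simp at hmem
      rcases hmem with rfl | hmem
      · rcases List.infix_cons_iff.mp hinf with hpre | hinf'
        · have hh : h' <+: rest := sp_head_prefix rest h' t' hsp'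
          have : sepC <+: c :: rest :=
            hpre.trans (List.cons_prefix_cons.mpr ⟨rfl, hh⟩)
          exact hp (List.isPrefixOf_iff_prefix.mpr this)
        · exact ih h' (by rw [hsp']; simp) hinf'
      · exact ih p (by rw [hsp']; simp [hmem]) hinf

theorem sp_decomp (s : List Char) : ∀ (h : List Char) (t : List (List Char)),
    sp s = h :: t → t ≠ [] → ∃ s', s = h ++ sepC ++ s' := by
  fun_induction sp s with
  | case1 => intro h t hsp ht; simp at hsp; exact absurd hsp.2.symm (Ne.symm ht)
  | case2 c rest hp ih =>
    intro h t hsp ht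
    simp at hsp
    obtain ⟨u, hu⟩ := List.isPrefixOf_iff_prefix.mp hp
    exact ⟨u, by simp [hsp.1, ← hu]⟩
  | case3 c rest hp ih =>
    intro h t hsp ht
    cases hsp' : sp rest with
    | nil => exact absurd hsp' (sp_ne_nil _)
    | cons h' t' =>
      rw [hsp'] at hsp
      simp at hsp
      obtain ⟨rfl, rfl⟩ := hsp
      obtain ⟨s', hs'⟩ := ih h' t' hsp' ht
      exact ⟨s', by simp [hs']⟩

theorem good_nil : good [] := by intro j hj; simp at hj

theorem sp_good_dropLast (s : List Char) : ∀ p ∈ (sp s).dropLast, good p := by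
  fun_induction sp s with
  | case1 => simp
  | case2 c rest hp ih =>
    intro p hmem
    cases hsp' : sp (rest.drop 2) with
    | nil => exact absurd hsp' (sp_ne_nil _)
    | cons h' t' =>
      rw [hsp'] at hmem
      simp only [List.dropLast_cons₂] at hmem
      rcases List.mem_cons.mp hmem with rfl | hmem
      · exact good_nil
      · refine ih p ?_
        rw [hsp']; exact hmem
  | case3 c rest hp ih =>
    intro p hmem
    cases hsp' : sp rest with
    | nil => exact absurd hsp' (sp_ne_nil _)
    | cons h' t' =>
      rw [hsp'] at hmem
      cases t' with
      | nil => simp at hmem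
      | cons t0 t1 =>
        simp only [List.modifyHead, List.dropLast_cons₂] at hmem
        rcases List.mem_cons.mp hmem with rfl | hmem
        · -- good (c :: h')
          intro j hj hpre
          cases j with
          | zero =>
            obtain ⟨s', hs'⟩ := sp_decomp rest h' (t0 :: t1) hsp' (by simp)
            have hext : (c :: h') ++ sepC <+: c :: rest := by
              rw [hs']; exact ⟨s', by simp⟩
            have h0 : sepC <+: (c :: h') ++ sepC := by simpa using hpre
            have : sepC <+: c :: rest := h0.trans hext
            exact hp (List.isPrefixOf_iff_prefix.mpr this)
          | succ j' =>
            have hgood : good h' := ih h' (by rw [hsp']; simp)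
            refine hgood j' (by simp at hj; omega) ?_
            simpa [List.drop_succ_cons] using hpre
        · exact ih p (by rw [hsp']; simp [hmem])

theorem intercalate_cons_ne_nil (x : List Char) (l : List (List Char)) (hl : l ≠ []) :
    List.intercalate sepC (x :: l) = x ++ sepC ++ List.intercalate sepC l := by
  cases l with
  | nil => exact absurd rfl hl
  | cons y t => simp [List.intercalate]

theorem sp_join (s : List Char) : List.intercalate sepC (sp s) = s := by
  fun_induction sp s with
  | case1 => simp [List.intercalate]
  | case2 c rest hp ih =>
    rw [intercalate_cons_ne_nil _ _ (sp_ne_nil _), ih]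
    obtain ⟨u, hu⟩ := List.isPrefixOf_iff_prefix.mp hp
    have hu' : c = '_' ∧ rest = '^' :: '_' :: u := by
      have h2 := hu.symm
      rw [show sepC ++ u = '_' :: '^' :: '_' :: u from rfl] at h2
      exact ⟨(List.cons.injEq _ _ _ _ ▸ h2).1, by simpa using (List.cons.injEq _ _ _ _ ▸ h2).2⟩
    obtain ⟨rfl, rfl⟩ := hu'
    simp [sepC]
  | case3 c rest hp ih =>
    cases hsp' : sp rest with
    | nil => exact absurd hsp' (sp_ne_nil _)
    | cons h' t' =>
      rw [hsp'] at ih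
      cases t' with
      | nil => simpa [List.intercalate] using ih
      | cons t0 t1 =>
        show List.intercalate sepC ((c :: h') :: t0 :: t1) = c :: rest
        rw [intercalate_cons_ne_nil _ _ (by simp)]
        rw [intercalate_cons_ne_nil _ _ (by simp)] at ih
        simpa using congrArg (List.cons c) ih

theorem sp_length_le (s : List Char) : (sp s).length ≤ s.length + 1 := by
  fun_induction sp s with
  | case1 => simp
  | case2 c rest hp ih =>
    have hlen : 2 ≤ rest.length := by
      have := (List.isPrefixOf_iff_prefix.mp hp).length_le
      simp [sepC] at this; omega
    simp at ih ⊢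
    omega
  | case3 c rest hp ih => simp at ih ⊢; omega

theorem sp_append_sep (p t : List Char) (hg : good p) : sp (p ++ sepC ++ t) = p :: sp t := by
  induction p with
  | nil =>
    show sp ('_' :: ('^' :: '_' :: t)) = [] :: sp t
    rw [sp]
    have hpre : sepC.isPrefixOf ('_' :: '^' :: '_' :: t) = true := by
      apply List.isPrefixOf_iff_prefix.mpr
      exact ⟨t, rfl⟩
    simp [hpre]
  | cons c p' ih =>
    have hnp : sepC.isPrefixOf (c :: (p' ++ sepC ++ t)) = false := by
      rw [Bool.eq_false_iff]
      intro hb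
      have hpre := List.isPrefixOf_iff_prefix.mp hb
      have hshort : sepC <+: (c :: p') ++ sepC := by
        rw [List.prefix_iff_eq_take] at hpre ⊢
        rw [show (c :: (p' ++ sepC ++ t)) = ((c :: p') ++ sepC) ++ t by simp] at hpre
        rwa [List.take_append_of_le_length (by simp [sepC])] at hpre
      exact hg 0 (by simp) (by simpa using hshort)
    have hg' : good p' := by
      intro j hj hpre
      refine hg (j + 1) (by simp; omega) ?_
      simpa [List.drop_succ_cons] using hpre
    show sp (c :: (p' ++ sepC ++ t)) = (c :: p') :: sp t
    rw [sp]
    simp only [hnp, Bool.false_eq_true, if_false, ih hg']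
    rfl

theorem sp_of_sepFree (p : List Char) (h : ¬ sepC <:+: p) : sp p = [p] := by
  induction p with
  | nil => simp [sp]
  | cons c p' ih =>
    rw [sp]
    have hnp : ¬ sepC.isPrefixOf (c :: p') = true := by
      intro hb
      exact h (List.isPrefixOf_iff_prefix.mp hb).isInfix
    simp only [hnp]
    rw [ih (fun hinf => h (List.infix_cons hinf))]
    rfl

theorem sp_intercalate (ps : List (List Char)) (t : List Char)
    (hg : ∀ p ∈ ps, good p) :
    sp (List.intercalate sepC (ps ++ [t])) = ps ++ sp t := by
  induction ps with
  | nil => simp [List.intercalate]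
  | cons p ps' ih =>
    rw [List.cons_append, intercalate_cons_ne_nil _ _ (by simp),
      sp_append_sep _ _ (hg p (by simp)), ih (fun q hq => hg q (by simp [hq]))]
    rfl

-- The common abstract scan both ports compute.
def scan (toc_level_map : List (String × Int)) (ps : List String) (last : String) :
    Int × Option String :=
  let cand := PySem.Str.join "_^_" (ps ++ [last])
  match (PySem.Dict.mk toc_level_map).get? cand with
  | some v => (v, some cand)
  | none =>
    match ps with
    | [] => (0, none)
    | p :: ps' => scan toc_level_map (p :: ps').dropLast last
termination_by ps.length
decreasing_by simp

theorem sep_toList : ("_^_" : String).toList = sepC := rfl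

theorem str_toList_inj {a b : String} (h : a.toList = b.toList) : a = b := by
  have ha : String.ofList a.toList = a := String.ofList_toList
  rw [← ha, h, String.ofList_toList]

theorem join_toList (xs : List String) :
    (PySem.Str.join "_^_" xs).toList = List.intercalate sepC (xs.map String.toList) := by
  rw [PySem.Str.toList_join, sep_toList]
  rfl

theorem map_toList_inj (xs ys : List String) (h : xs.map String.toList = ys.map String.toList) :
    xs = ys := by
  have h2 := congrArg (List.map String.ofList) h
  simpa [List.map_map, Function.comp_def, String.ofList_toList] using h2

theorem split_full (s : String) :
    ((PySem.Str.split? s "_^_").getD []).map String.toList = sp s.toList := by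
  have h := PySem.Str.split?_map s "_^_"
  rw [sep_toList, PySem.Chars.split?] at h
  cases hs : PySem.Str.split? s "_^_" with
  | none => rw [hs] at h; simp [sepC] at h
  | some L =>
    rw [hs] at h
    simp [show sepC.isEmpty = false from rfl] at h
    simpa [splitOn_eq_sp] using h

theorem join_single (x : String) : PySem.Str.join "_^_" [x] = x := by
  apply str_toList_inj
  rw [join_toList]
  simp [List.intercalate]

theorem aGo_eq_scan (ps : List String) (last : String) (d : List (String × Int)) (fuel : Nat)
    (hg : ∀ p ∈ ps, good p.toList) (hl : ¬ sepC <:+: last.toList)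
    (hf : ps.length < fuel) :
    getTextLevelGo fuel (PySem.Str.join "_^_" (ps ++ [last])) d = scan d ps last := by
  induction fuel generalizing ps with
  | zero => omega
  | succ fuel ih =>
    rw [getTextLevelGo, scan.eq_def]
    cases hq : (PySem.Dict.mk d).get? (PySem.Str.join "_^_" (ps ++ [last])) with
    | some v => simp only [hq]
    | none =>
      simp only [hq]
      cases ps with
      | nil =>
        have hIn : PySem.Str.isIn "_^_" (PySem.Str.join "_^_" (([] : List String) ++ [last])) = false := by
          rw [show (([] : List String) ++ [last]) = [last] from rfl, join_single]
          simp only [PySem.Str.isIn, sep_toList]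
          exact (PySem.Chars.isIn_eq_false_iff _ _).mpr hl
        rw [hIn]
        simp
      | cons p ps' =>
        have hkeyL : (PySem.Str.join "_^_" ((p :: ps') ++ [last])).toList
            = List.intercalate sepC (((p :: ps') ++ [last]).map String.toList) := join_toList _
        have hsp_key : sp (PySem.Str.join "_^_" ((p :: ps') ++ [last])).toList
            = ((p :: ps') ++ [last]).map String.toList := by
          rw [hkeyL,
            show ((p :: ps') ++ [last]).map String.toList
              = ((p :: ps').map String.toList) ++ [last.toList] by simp,
            sp_intercalate _ _ ?goods, sp_of_sepFree _ hl]
          case goods =>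
            intro x hx
            simp only [List.mem_map] at hx
            obtain ⟨y, hy, rfl⟩ := hx
            exact hg y hy
        have hIn : PySem.Str.isIn "_^_" (PySem.Str.join "_^_" ((p :: ps') ++ [last])) = true := by
          apply (PySem.Str.isIn_iff_infix _ _).mpr
          rw [sep_toList, hkeyL,
            show ((p :: ps') ++ [last]).map String.toList
              = p.toList :: ((ps'.map String.toList) ++ [last.toList]) by simp,
            intercalate_cons_ne_nil _ _ (by simp)]
          exact ⟨p.toList, List.intercalate sepC (ps'.map String.toList ++ [last.toList]), by simp⟩
        rw [if_pos hIn]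
        have hpairs : (PySem.Str.split? (PySem.Str.join "_^_" ((p :: ps') ++ [last])) "_^_").getD []
            = (p :: ps') ++ [last] :=
          map_toList_inj _ _ (by rw [split_full, hsp_key])
        simp only [hpairs]
        cases ps' with
        | nil =>
          have hget : (PySem.List.pyGet? ((p :: ([] : List String)) ++ [last]) 1).getD "" = last := by
            rw [show (1 : Int) = ((1 : Nat) : Int) from rfl, PySem.List.pyGet?_natCast]
            simp
          have hih := ih [] (by simp) (by simp at hf ⊢; omega)
          simp only [List.nil_append, join_single] at hih
          simp [hih]
        | cons q qs' =>
          have hlenne : ((((p :: q :: qs') ++ [last]).length == 2) = false) := by simp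
          have hslice : PySem.List.slice ((p :: q :: qs') ++ [last]) none (some (-2))
              = (p :: q :: qs').dropLast := by
            rw [PySem.List.slice_to_neg_ofNat _ 2 (by norm_num),
              List.take_append_of_le_length
                (by simp only [List.length_append, List.length_cons, List.length_nil]; omega),
              List.dropLast_eq_take]
            congr 1
            simp only [List.length_append, List.length_cons, List.length_nil]
            omega
          have hlast : (PySem.List.pyGet? ((p :: q :: qs') ++ [last]) (-1)).getD "" = last := by
            rw [PySem.List.pyGet?_neg_one, List.getLast?_concat]
            rfl
          have hih := ih ((p :: q :: qs').dropLast)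
            (by intro x hx; exact hg x (List.mem_of_mem_dropLast hx))
            (by simp at hf ⊢; omega)
          simp only [hlenne, Bool.false_eq_true, if_false, hslice, hlast, hih]

theorem bLoop_eq_scan (segs : List String) (last : String) (d : List (String × Int)) (k : Nat)
    (hk : k < segs.length) :
    getTextLevelAltLoop (PySem.List.pyRange (k : Int) (-1) (-1)) segs last d
      = scan d (segs.take k) last := by
  induction k with
  | zero =>
    rw [PySem.List.pyRange_neg_one_cons (by norm_num),
      PySem.List.pyRange_neg_one_eq_nil (by norm_num)]
    rw [getTextLevelAltLoop, scan.eq_def]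
    simp only [PySem.List.slice_to_natCast, List.take_zero]
    cases hq : (PySem.Dict.mk d).get? (PySem.Str.join "_^_" ([] ++ [last])) with
    | some v => rfl
    | none => simp only [getTextLevelAltLoop]
  | succ k' ihk =>
    have hk' : k' < segs.length := by omega
    rw [PySem.List.pyRange_neg_one_cons (by push_cast; omega)]
    rw [getTextLevelAltLoop,
      show ((k' + 1 : Nat) : Int) - 1 = ((k' : Nat) : Int) from by push_cast; omega,
      scan.eq_def]
    simp only [PySem.List.slice_to_natCast]
    cases hq : (PySem.Dict.mk d).get? (PySem.Str.join "_^_" (List.take (k' + 1) segs ++ [last])) with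
    | some v => rfl
    | none =>
      simp only []
      rw [ihk hk']
      cases hts : segs.take (k' + 1) with
      | nil =>
        have hnil : segs = [] := by simpa using congrArg List.length hts
        rw [hnil] at hk
        simp at hk
      | cons x xs =>
        have hdl : (x :: xs).dropLast = segs.take k' := by
          rw [← hts, List.dropLast_take hk]
          simp
        show scan d (List.take k' segs) last = scan d (x :: xs).dropLast last
        rw [hdl]

-- ===== VERDICT (by name: the statement is the Claim_ definition above) =====
theorem get_text_level_spec : Claim_equal_get_text_level := by
  intro key toc_level_map _
  unfold Spec_get_text_level
  simp only [get_text_level, get_text_level_alt]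
  have hmap : ((PySem.Str.split? key "_^_").getD []).map String.toList = sp key.toList :=
    split_full key
  set segs := (PySem.Str.split? key "_^_").getD [] with hsegs
  have hne : segs ≠ [] := by
    intro h0
    rw [h0] at hmap
    exact sp_ne_nil _ (by simpa using hmap.symm)
  have hlen : segs.length = (sp key.toList).length := by
    have := congrArg List.length hmap
    simpa using this
  have hlast : (PySem.List.pyGet? segs (-1)).getD "" = segs.getLast hne := by
    rw [PySem.List.pyGet?_neg_one, List.getLast?_eq_some_getLast hne]
    rfl
  rw [hlast]
  have hkB : segs.length - 1 < segs.length := by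
    cases hs : segs with
    | nil => exact absurd hs hne
    | cons a l => simp
  have hB := bLoop_eq_scan segs (segs.getLast hne) toc_level_map (segs.length - 1) hkB
  rw [show ((segs.length : Int) - 1) = ((segs.length - 1 : Nat) : Int) from by
    have : 1 ≤ segs.length := by omega
    omega]
  rw [hB]
  have hgoods : ∀ x ∈ segs.dropLast, good x.toList := by
    intro x hx
    apply sp_good_dropLast key.toList
    rw [← hmap, ← List.map_dropLast]
    exact List.mem_map_of_mem hx
  have hfree : ¬ sepC <:+: (segs.getLast hne).toList := by
    apply sp_sepFree key.toList
    rw [← hmap]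
    exact List.mem_map_of_mem (List.getLast_mem hne)
  have hfuel : segs.dropLast.length < key.toList.length + 1 := by
    have h1 := sp_length_le key.toList
    have h2 : segs.dropLast.length = segs.length - 1 := by simp
    omega
  have hA := aGo_eq_scan segs.dropLast (segs.getLast hne) toc_level_map
    (key.toList.length + 1) hgoods hfree hfuel
  have hjoin : PySem.Str.join "_^_" (segs.dropLast ++ [segs.getLast hne]) = key := by
    apply str_toList_inj
    rw [join_toList, List.dropLast_append_getLast hne, hmap, sp_join]
  rw [hjoin] at hA
  rw [hA, List.dropLast_eq_take]
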